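-- pv_equiv track=rewrite | github.com/timurkayukov/python1semestr | seminars/contest2/B.py | beauty
-- ===== SOURCE A (Python) =====
-- def search(a,h):
--     for i in range(len(a)-1,-1,-1):
--         if a[i]>=h:
--             return i
--     return -1
--
-- def beauty(a):
--     b=[-1 for i in range(len(a))]
--     maximum=a[0]
--     for i in range(1,len(a)):
--         if a[i]>maximum:
--             b[i]=-1
--             maximum=a[i]
--         else:
--             b[i]=search(a[:i],a[i])
--
--     return b
-- ===== SOURCE B (Python) =====
-- def beauty(a):
--     # one pass with a monotonic stack of (index, value) pairs, top at the end;
--     # values on the stack are non-increasing toward the top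
--     b = []
--     st = []
--     for i, x in enumerate(a):
--         while st and st[-1][1] < x:
--             st.pop()
--         b.append(st[-1][0] if st else -1)
--         st.append((i, x))
--     return b
-- ===== Notes on version B (the rewrite author's own statement) =====
-- stated objective: faster
-- what changed: Replaces the per-element backward rescan of the whole prefix (plus a running-maximum shortcut) with a single left-to-right pass over a monotonic stack of (index,value) pairs, so each index is pushed and popped at most once.
import Mathlib
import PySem

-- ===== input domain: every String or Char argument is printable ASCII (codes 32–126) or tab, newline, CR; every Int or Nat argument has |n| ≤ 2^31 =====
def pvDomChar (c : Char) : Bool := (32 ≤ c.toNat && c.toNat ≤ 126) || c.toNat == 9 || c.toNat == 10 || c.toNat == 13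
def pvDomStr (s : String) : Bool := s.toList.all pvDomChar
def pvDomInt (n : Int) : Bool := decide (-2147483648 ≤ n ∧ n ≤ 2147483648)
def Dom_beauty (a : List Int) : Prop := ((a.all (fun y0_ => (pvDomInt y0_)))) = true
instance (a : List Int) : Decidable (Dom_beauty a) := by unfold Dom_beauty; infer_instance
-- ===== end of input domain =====

-- B replaces A's per-element backward rescan of the prefix with a one-pass monotonic stack.
-- A raises IndexError on the empty list (it reads the first element); Pre_ excludes exactly that input.

-- ===== PORT A =====
-- search(a, h): scan indices len(a)-1 .. 0, return first i with a[i] >= h, else -1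
def searchLoop (a : List Int) (h : Int) : List Int → Int
  | [] => -1
  | i :: rest => if h ≤ PySem.List.pyGetD a i 0 then i else searchLoop a h rest

def searchA (a : List Int) (h : Int) : Int :=
  searchLoop a h (PySem.List.pyRange ((a.length : Int) - 1) (-1) (-1))

def beauty (a : List Int) : List Int :=
  let b0 : List Int := (PySem.List.pyRange 0 (a.length : Int) 1).map (fun _ => (-1 : Int))
  -- Python reads the first element here and raises IndexError on the empty list; Pre_beauty excludes that input, so getD's default is never used
  let maximum : Int := (PySem.List.pyGet? a 0).getD 0
  ((PySem.List.pyRange 1 (a.length : Int) 1).foldl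
    (fun (s : List Int × Int) i =>
      let ai := PySem.List.pyGetD a i 0
      if s.2 < ai then (s.1.set i.toNat (-1), ai)
      else (s.1.set i.toNat (searchA (PySem.List.slice a (some 0) (some i)) ai), s.2))
    (b0, maximum)).1

-- ===== PORT B =====
-- the 'while st and st[-1][1] < x: st.pop()' loop; stack top is the HEAD here
def popLoop (x : Int) : List (Int × Int) → List (Int × Int)
  | [] => []
  | (j, v) :: rest => if v < x then popLoop x rest else (j, v) :: rest

def beauty_alt (a : List Int) : List Int :=
  ((PySem.List.enumerate a 0).foldl
    (fun (s : List Int × List (Int × Int)) p =>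
      let st := popLoop p.2 s.2
      (s.1 ++ [match st with | [] => (-1 : Int) | (j, _) :: _ => j], (p.1, p.2) :: st))
    ([], [])).1

-- ===== PRECONDITION & SPEC =====
-- Pre_ excludes exactly the empty list, on which Python A raises IndexError reading its first element.
def Pre_beauty (a : List Int) : Prop := a ≠ []
instance (a : List Int) : Decidable (Pre_beauty a) := by unfold Pre_beauty; infer_instance
def pvWitness_beauty : List Int := [3, 1, 4, 1, 5]

def Spec_beauty (a : List Int) (out : List Int) : Prop := out = beauty_alt a
instance (a : List Int) (out : List Int) : Decidable (Spec_beauty a out) := by unfold Spec_beauty; infer_instance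

-- ===== CLAIM (what is proved, stated in full; the proofs are below) =====
def Claim_equal_beauty : Prop := ∀ (a : List Int), Dom_beauty a → Pre_beauty a → Spec_beauty a (beauty a)

-- ===== LEMMAS AND PROOFS =====

def bestIdx (p : Nat → Bool) (n : Nat) : Int :=
  match (List.range n).reverse.find? p with
  | some j => (j : Int)
  | none => -1

theorem revRange_succ (n : Nat) :
    (List.range (n + 1)).reverse = n :: (List.range n).reverse := by
  simp [List.range_succ]

theorem bestIdx_congr (p q : Nat → Bool) (n : Nat)
    (h : ∀ j < n, p j = q j) : bestIdx p n = bestIdx q n := by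
  induction n with
  | zero => rfl
  | succ n ih =>
    unfold bestIdx
    rw [revRange_succ, List.find?_cons, List.find?_cons, h n (by omega)]
    cases hq : q n with
    | true => rfl
    | false =>
      have := ih (fun j hj => h j (by omega))
      unfold bestIdx at this
      cases h1 : (List.range n).reverse.find? p <;>
        cases h2 : (List.range n).reverse.find? q <;>
        simp [h1, h2] at this ⊢ <;> omega

theorem bestIdx_neg (p : Nat → Bool) (n : Nat)
    (h : ∀ j < n, p j = false) : bestIdx p n = -1 := by
  have : (List.range n).reverse.find? p = none := by
    rw [List.find?_eq_none]
    intro j hj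
    simp at hj
    simp [h j hj]
  simp [bestIdx, this]

theorem bestIdx_and (p q : Nat → Bool) (n : Nat)
    (h : ∀ j < n, q j = true → (∀ k, j < k → k < n → q k = false) → p j = true) :
    bestIdx (fun j => p j && q j) n = bestIdx q n := by
  induction n with
  | zero => rfl
  | succ n ih =>
    unfold bestIdx
    rw [revRange_succ, List.find?_cons, List.find?_cons]
    cases hq : q n with
    | true =>
      have hp : p n = true := h n (by omega) hq (by omega)
      simp [hp, hq]
    | false =>
      have := ih (fun j hj hqj hno => h j (by omega) hqj
        (fun k hk1 hk2 => by
          rcases Nat.lt_or_ge k n with h'|h'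
          · exact hno k hk1 h'
          · have hkn : k = n := by omega
            simpa [hkn] using hq))
      unfold bestIdx at this
      simpa [hq, Bool.and_false] using this

def prevGE (a : List Int) (i : Nat) : Int :=
  bestIdx (fun j => decide (a.getD i 0 ≤ a.getD j 0)) i

def descIdx (n : Nat) : List Int := (List.range n).map (fun k : Nat => (n : Int) - 1 - (k : Int))

theorem descIdx_succ (n : Nat) : descIdx (n + 1) = (n : Int) :: descIdx n := by
  unfold descIdx
  simp only [List.range_succ_eq_map, List.map_cons, List.map_map]
  congr 1
  · push_cast; ring
  · apply List.map_congr_left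
    intro k _
    simp only [Function.comp]
    push_cast; ring

theorem pyRange_down (n : Nat) :
    PySem.List.pyRange ((n : Int) - 1) (-1) (-1) = descIdx n := by
  unfold PySem.List.pyRange descIdx
  have hstep : ¬ ((-1:Int) = 0) := by omega
  have h1 : ¬ ((0:Int) < -1) := by omega
  simp only [if_neg hstep, h1, if_false]
  cases n with
  | zero => simp
  | succ m =>
    have h2 : (-1:Int) < (m+1:Nat) - 1 := by push_cast; omega
    rw [if_pos h2]
    have hc : ((((m+1:Nat):Int) - 1 - -1 + - -1 - 1) / -(-1)).toNat = m + 1 := by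
      push_cast; omega
    rw [hc]
    apply List.map_congr_left
    intro k _
    push_cast; ring

theorem searchLoop_spec (l : List Int) (h : Int) (n : Nat) :
    searchLoop l h (descIdx n) = bestIdx (fun j => decide (h ≤ l.getD j 0)) n := by
  induction n with
  | zero => rfl
  | succ n ih =>
    rw [descIdx_succ]
    unfold searchLoop bestIdx
    rw [revRange_succ, List.find?_cons]
    simp only [List.getD_eq_getElem?_getD, PySem.List.pyGetD_natCast]
    by_cases hc : h ≤ l[n]?.getD 0
    · simp [hc]
    · simp only [if_neg hc, hc, decide_false]
      rw [ih]
      simp [bestIdx, List.getD_eq_getElem?_getD]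

theorem searchA_spec (l : List Int) (h : Int) :
    searchA l h = bestIdx (fun j => decide (h ≤ l.getD j 0)) l.length := by
  unfold searchA
  rw [pyRange_down, searchLoop_spec]

theorem set_map_range {α : Type} (f : Nat → α) (n i : Nat) (x : α) :
    ((List.range n).map f).set i x
      = (List.range n).map (fun k => if k = i then x else f k) := by
  apply List.ext_getElem
  · simp
  · intro k h1 h2
    simp only [List.getElem_set, List.getElem_map, List.getElem_range]
    rcases eq_or_ne i k with h | h
    · simp [h]
    · simp [h, Ne.symm h]

-- the A loop invariant, by induction on how many indices 1..i-1 are processed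

theorem beautyA_inv (a : List Int) (ha : a ≠ []) (i : Nat) (h1 : 1 ≤ i) (hi : i ≤ a.length) :
    (PySem.List.pyRange 1 (i : Int) 1).foldl
      (fun (s : List Int × Int) j =>
        let aj := PySem.List.pyGetD a j 0
        if s.2 < aj then (s.1.set j.toNat (-1), aj)
        else (s.1.set j.toNat (searchA (PySem.List.slice a (some 0) (some j)) aj), s.2))
      ((PySem.List.pyRange 0 (a.length : Int) 1).map (fun _ => (-1 : Int)),
       (PySem.List.pyGet? a 0).getD 0)
    = ((List.range a.length).map (fun k => if k < i then prevGE a k else -1),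
       ((List.range i).map (fun k => a.getD k 0)).foldl max (a.getD 0 0)) := by
  induction i with
  | zero => omega
  | succ i ih =>
    rcases Nat.lt_or_ge i 1 with hi1 | hi1
    · -- i = 0 : base case, the range 1..1 is empty
      have hi0 : i = 0 := by omega
      subst hi0
      have hr : PySem.List.pyRange 1 ((1:Nat) : Int) 1 = [] := by
        apply PySem.List.pyRange_one_eq_nil; norm_num
      rw [show ((0:Nat) + 1 : Nat) = 1 from rfl, hr]
      simp only [List.foldl_nil, Prod.mk.injEq]
      refine ⟨?_, ?_⟩
      · rw [PySem.List.pyRange_zero_nat, List.map_map]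
        apply List.map_congr_left
        intro k _
        by_cases h : k = 0
        · subst h; simp [Function.comp, prevGE, bestIdx]
        · simp [Function.comp, show ¬ k < 1 by omega]
      · have h0 : PySem.List.pyGet? a 0 = some (a.getD 0 0) := by
          rcases a with _ | ⟨x, t⟩
          · exact absurd rfl ha
          · simp [PySem.List.pyGet?_zero_cons, List.getD_cons_zero]
        rw [h0]
        simp
    · -- step: 1 ≤ i, i < a.length
      have hin : i < a.length := by omega
      have hsplit : PySem.List.pyRange 1 ((i+1 : Nat) : Int) 1
          = PySem.List.pyRange 1 ((i : Nat) : Int) 1 ++ [(i : Int)] := by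
        push_cast
        exact PySem.List.pyRange_one_succ_right (by exact_mod_cast hi1)
      rw [hsplit, List.foldl_append, ih hi1 (by omega)]
      simp only [List.foldl_cons, List.foldl_nil]
      have hpg : PySem.List.pyGetD a ((i : Nat) : Int) 0 = a.getD i 0 := by
        simp [PySem.List.pyGetD_natCast, List.getD_eq_getElem?_getD]
      set M := ((List.range i).map (fun k => a.getD k 0)).foldl max (a.getD 0 0) with hM
      have hub : ∀ k < i, a.getD k 0 ≤ M := by
        intro k hk
        exact (PySem.List.le_foldl_max ((List.range i).map (fun k => a.getD k 0)) (a.getD 0 0)).2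
          _ (List.mem_map.mpr ⟨k, List.mem_range.mpr hk, rfl⟩)
      have hmem : ∃ k < i, M = a.getD k 0 := by
        rcases PySem.List.foldl_max_mem ((List.range i).map (fun k => a.getD k 0)) (a.getD 0 0) with h | h
        · exact ⟨0, hi1, h⟩
        · rcases List.mem_map.mp h with ⟨k, hk, hkv⟩
          exact ⟨k, List.mem_range.mp hk, hkv.symm⟩
      have hMstep : ((List.range (i+1)).map (fun k => a.getD k 0)).foldl max (a.getD 0 0)
          = max M (a.getD i 0) := by
        rw [List.range_succ, List.map_append, List.foldl_append, ← hM]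
        simp only [List.map_cons, List.map_nil, List.foldl_cons, List.foldl_nil]
      have htoNat : ((i : Nat) : Int).toNat = i := by omega
      simp only [hpg, htoNat]
      by_cases hcase : M < a.getD i 0
      · rw [if_pos hcase]
        simp only [Prod.mk.injEq]
        refine ⟨?_, ?_⟩
        · rw [set_map_range]
          apply List.map_congr_left
          intro k hk
          by_cases hki : k = i
          · subst hki
            have : prevGE a k = -1 := by
              apply bestIdx_neg
              intro j hj
              simp only [decide_eq_false_iff_not, not_le]
              exact lt_of_le_of_lt (hub j hj) hcase
            simp [this]
          · by_cases hkl : k < i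
            · simp [hki, hkl, show k < i + 1 by omega]
            · simp [hki, hkl, show ¬ (k < i + 1) by omega]
        · rw [hMstep]; omega
      · rw [if_neg hcase]
        push_neg at hcase
        have hslice : PySem.List.slice a (some 0) (some ((i : Nat) : Int)) = a.take i := by
          rw [PySem.List.slice_zero_start, PySem.List.slice_to_natCast]
        have hlen : (a.take i).length = i := by
          simp [List.length_take]; omega
        have hsearch : searchA (a.take i) (a.getD i 0) = prevGE a i := by
          rw [searchA_spec, hlen]
          apply bestIdx_congr
          intro j hj
          have : (a.take i).getD j 0 = a.getD j 0 := by
            simp [List.getD_eq_getElem?_getD, List.getElem?_take_of_lt hj]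
          rw [this]
        simp only [Prod.mk.injEq]
        refine ⟨?_, ?_⟩
        · rw [hslice, hsearch, set_map_range]
          apply List.map_congr_left
          intro k hk
          by_cases hki : k = i
          · simp [hki]
          · by_cases hkl : k < i
            · simp [hki, hkl, show k < i + 1 by omega]
            · simp [hki, hkl, show ¬ (k < i + 1) by omega]
        · rw [hMstep]; omega

theorem beautyA_eq_map (a : List Int) (ha : a ≠ []) :
    beauty a = (List.range a.length).map (prevGE a) := by
  have hn : 1 ≤ a.length := List.length_pos_iff.mpr ha
  unfold beauty
  have := beautyA_inv a ha a.length hn le_rfl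
  simp only [this]
  apply List.map_congr_left
  intro k hk
  simp [List.mem_range.mp hk]

-- ## B-side

def stackSpec (a : List Int) (m : Nat) : List (Int × Int) :=
  ((List.range m).reverse.filter
    (fun j => decide (∀ k < m, j < k → a.getD k 0 ≤ a.getD j 0))).map
    (fun j : Nat => ((j : Int), a.getD j 0))

theorem enumerate_eq {α : Type} (a : List α) [Inhabited α] : ∀ (s : Int),
    PySem.List.enumerate a s
      = (List.range a.length).map (fun k : Nat => (s + (k : Int), a.getD k default)) := by
  induction a with
  | nil => intro s; rfl
  | cons x t ih =>
    intro s
    show (s, x) :: PySem.List.enumerate t (s + 1) = _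
    rw [ih (s + 1)]
    simp only [List.length_cons, List.range_succ_eq_map, List.map_cons, List.map_map]
    congr 1
    · simp
    · apply List.map_congr_left
      intro k _
      simp only [Function.comp, List.getD_cons_succ, Nat.succ_eq_add_one]
      congr 1
      push_cast; ring

theorem popLoop_eq_dropWhile (x : Int) : ∀ l : List (Int × Int),
    popLoop x l = l.dropWhile (fun p => decide (p.2 < x)) := by
  intro l
  induction l with
  | nil => rfl
  | cons p t ih =>
    rcases p with ⟨j, v⟩
    by_cases h : v < x
    · simp [popLoop, h, List.dropWhile_cons, ih]
    · simp [popLoop, h, List.dropWhile_cons]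

theorem dropWhile_lt_eq_filter (x : Int) : ∀ l : List (Int × Int),
    l.Pairwise (fun p q => p.2 ≤ q.2) →
    l.dropWhile (fun p => decide (p.2 < x)) = l.filter (fun p => decide (x ≤ p.2)) := by
  intro l
  induction l with
  | nil => intro _; rfl
  | cons p t ih =>
    intro hp
    rcases List.pairwise_cons.mp hp with ⟨hhead, htail⟩
    by_cases h : p.2 < x
    · have hx : ¬ (x ≤ p.2) := by omega
      simp [List.dropWhile_cons, List.filter_cons, h, hx, ih htail]
    · have hx : x ≤ p.2 := by omega
      simp only [List.dropWhile_cons, List.filter_cons, h, hx, decide_true, decide_false,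
        Bool.false_eq_true, if_false, if_true]
      rw [List.filter_eq_self.mpr]
      intro q hq
      simp only [decide_eq_true_eq]
      exact le_trans hx (hhead q hq)

theorem stackSpec_pairwise (a : List Int) (m : Nat) :
    (stackSpec a m).Pairwise (fun p q => p.2 ≤ q.2) := by
  unfold stackSpec
  apply List.Pairwise.map (R := fun j j' : Nat =>
    j' < j ∧ (∀ k < m, j' < k → a.getD k 0 ≤ a.getD j' 0) ∧ j < m)
  · rintro j j' ⟨h1, h2, h3⟩
    exact h2 j h3 h1
  · have hrev : ((List.range m).reverse).Pairwise (fun j j' : Nat => j' < j) :=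
      List.pairwise_reverse.mpr List.pairwise_lt_range
    have := List.Pairwise.filter
      (fun j => decide (∀ k < m, j < k → a.getD k 0 ≤ a.getD j 0)) hrev
    apply List.Pairwise.imp_of_mem ?_ this
    intro p q hp hq hlt
    refine ⟨hlt, ?_, ?_⟩
    · have := List.of_mem_filter hq
      simpa using this
    · have := List.mem_of_mem_filter hp
      simp at this
      exact this

theorem stackSpec_succ (a : List Int) (m : Nat) :
    stackSpec a (m + 1)
      = ((m : Int), a.getD m 0) ::
        (stackSpec a m).filter (fun p => decide (a.getD m 0 ≤ p.2)) := by
  unfold stackSpec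
  rw [revRange_succ, List.filter_cons]
  have hm : decide (∀ k < m + 1, m < k → a.getD k 0 ≤ a.getD m 0) = true := by
    simp only [decide_eq_true_eq]
    intro k h1 h2; omega
  rw [hm, if_pos rfl, List.map_cons]
  congr 1
  rw [List.filter_map, List.filter_filter]
  apply congrArg
  apply List.filter_congr
  intro j hj
  have hjm : j < m := by simpa using hj
  show (decide (∀ k < m + 1, j < k → a.getD k 0 ≤ a.getD j 0)) = ((decide (a.getD m 0 ≤ a.getD j 0)) && (decide (∀ k < m, j < k → a.getD k 0 ≤ a.getD j 0)))
  rw [← Bool.decide_and, decide_eq_decide]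
  constructor
  · intro hall
    exact ⟨hall m (by omega) hjm, fun k hk1 hk2 => hall k (by omega) hk2⟩
  · rintro ⟨hm', hall⟩ k hk1 hk2
    rcases Nat.lt_or_ge k m with h' | h'
    · exact hall k h' hk2
    · have : k = m := by omega
      subst this; exact hm'

theorem popped_head (a : List Int) (m : Nat) :
    (match (stackSpec a m).filter (fun p => decide (a.getD m 0 ≤ p.2)) with
      | [] => (-1 : Int) | (j, _) :: _ => j) = prevGE a m := by
  unfold stackSpec
  rw [List.filter_map, List.filter_filter]
  have hcg : (List.range m).reverse.filter
        (fun j => ((fun p : Int × Int => decide (a.getD m 0 ≤ p.2)) ∘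
            (fun j : Nat => ((j : Int), a.getD j 0))) j &&
          decide (∀ k < m, j < k → a.getD k 0 ≤ a.getD j 0))
      = (List.range m).reverse.filter
        (fun j => decide (∀ k < m, j < k → a.getD k 0 ≤ a.getD j 0) &&
          decide (a.getD m 0 ≤ a.getD j 0)) := by
    apply List.filter_congr
    intro j _
    show ((decide (a.getD m 0 ≤ a.getD j 0)) && (decide (∀ k < m, j < k → a.getD k 0 ≤ a.getD j 0))) = ((decide (∀ k < m, j < k → a.getD k 0 ≤ a.getD j 0)) && (decide (a.getD m 0 ≤ a.getD j 0)))
    exact Bool.and_comm _ _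
  rw [hcg]
  have hba : bestIdx (fun j => decide (∀ k < m, j < k → a.getD k 0 ≤ a.getD j 0) &&
        decide (a.getD m 0 ≤ a.getD j 0)) m
      = bestIdx (fun j => decide (a.getD m 0 ≤ a.getD j 0)) m := by
    apply bestIdx_and
    intro j hj hq hno
    simp only [decide_eq_true_eq] at hq ⊢
    intro k hk hjk
    have := hno k hjk hk
    simp only [decide_eq_false_iff_not, not_le] at this
    omega
  have hhead := List.head?_filter (p := fun j => decide (∀ k < m, j < k → a.getD k 0 ≤ a.getD j 0) &&
        decide (a.getD m 0 ≤ a.getD j 0)) (l := (List.range m).reverse)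
  unfold prevGE
  rw [← hba]
  unfold bestIdx
  rw [← hhead]
  cases hL : (List.range m).reverse.filter (fun j => decide (∀ k < m, j < k → a.getD k 0 ≤ a.getD j 0) &&
        decide (a.getD m 0 ≤ a.getD j 0)) with
  | nil => rfl
  | cons j t => rfl

theorem beautyB_inv (a : List Int) (m : Nat) :
    ((List.range m).map (fun k : Nat => ((k : Int), a.getD k 0))).foldl
      (fun (s : List Int × List (Int × Int)) p =>
        let st := popLoop p.2 s.2
        (s.1 ++ [match st with | [] => (-1 : Int) | (j, _) :: _ => j], (p.1, p.2) :: st))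
      ([], [])
    = ((List.range m).map (prevGE a), stackSpec a m) := by
  induction m with
  | zero => rfl
  | succ m ih =>
    rw [List.range_succ, List.map_append, List.map_append, List.foldl_append, ih]
    simp only [List.map_cons, List.map_nil, List.foldl_cons, List.foldl_nil]
    have hpop : popLoop (a.getD m 0) (stackSpec a m)
        = (stackSpec a m).filter (fun p => decide (a.getD m 0 ≤ p.2)) := by
      rw [popLoop_eq_dropWhile, dropWhile_lt_eq_filter _ _ (stackSpec_pairwise a m)]
    simp only [hpop]
    congr 1
    · rw [popped_head]
    · rw [stackSpec_succ]

theorem beautyB_eq_map (a : List Int) :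
    beauty_alt a = (List.range a.length).map (prevGE a) := by
  unfold beauty_alt
  rw [enumerate_eq a 0]
  have hcg : (List.range a.length).map (fun k : Nat => ((0 : Int) + (k : Int), a.getD k default))
      = (List.range a.length).map (fun k : Nat => ((k : Int), a.getD k 0)) := by
    apply List.map_congr_left
    intro k _
    simp
  rw [hcg, beautyB_inv]

-- ===== VERDICT (by name: the statement is the Claim_ definition above) =====
theorem beauty_spec : Claim_equal_beauty := by
  intro a _ ha
  unfold Spec_beauty
  rw [beautyA_eq_map a ha, beautyB_eq_map a]
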